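-- pv_equiv track=rewrite | github.com/Mustafaard/TicarNet | scripts/split-homepage-css.py | parse_css_blocks
-- ===== SOURCE A (Python) =====
-- def parse_css_blocks(lines):
--     """
--     Parse CSS into top-level blocks.
--     A block is: a comment section + the rules that follow it until the next
--     top-level block, or just rules between blocks.
--     We split at every line where brace depth returns to 0.
--     """
--     blocks = []
--     current_block = []
--     depth = 0
--
--     for line in lines:
--         current_block.append(line)
--         # Count braces (ignoring those in strings/comments is complex,
--         # but CSS class names don't contain braces so this is safe enough)
--         depth += line.count('{') - line.count('}')
--
--         # When we're back at depth 0 and have content, check if next line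
--         # starts a new selector or comment
--         if depth == 0 and current_block:
--             # Check if the block is "complete" (has at least one closing brace
--             # or is just comments/whitespace)
--             has_brace = any('}' in l for l in current_block)
--             if has_brace:
--                 blocks.append(current_block)
--                 current_block = []
--
--     # Don't lose trailing content
--     if current_block:
--         blocks.append(current_block)
--
--     return blocks
-- ===== SOURCE B (Python) =====
-- def _first_cut(lines):
--     """Index of the first line at which cumulative brace depth is 0 and a '}'
--     has appeared so far, or None if no such line exists."""
--     depth = 0
--     seen = False
--     for i, line in enumerate(lines):
--         depth += line.count('{') - line.count('}')
--         seen = seen or '}' in line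
--         if depth == 0 and seen:
--             return i
--     return None
--
--
-- def parse_css_blocks(lines):
--     # Staged find-and-slice: repeatedly locate the end of the first complete
--     # block, slice it off, and continue on the remaining suffix.
--     blocks = []
--     rest = lines
--     while rest:
--         i = _first_cut(rest)
--         if i is None:
--             blocks.append(rest)
--             break
--         blocks.append(rest[:i + 1])
--         rest = rest[i + 1:]
--     return blocks
-- ===== Notes on version B (the rewrite author's own statement) =====
-- stated objective: faster
-- what changed: B is a staged find-and-slice loop: a helper scans for the index where the first complete block ends, the block is sliced off and the loop repeats on the remaining suffix, so no growing buffer is kept and A's rescan of the whole current block (any('}' in l ...)) at every depth-0 line disappears.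
import Mathlib
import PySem

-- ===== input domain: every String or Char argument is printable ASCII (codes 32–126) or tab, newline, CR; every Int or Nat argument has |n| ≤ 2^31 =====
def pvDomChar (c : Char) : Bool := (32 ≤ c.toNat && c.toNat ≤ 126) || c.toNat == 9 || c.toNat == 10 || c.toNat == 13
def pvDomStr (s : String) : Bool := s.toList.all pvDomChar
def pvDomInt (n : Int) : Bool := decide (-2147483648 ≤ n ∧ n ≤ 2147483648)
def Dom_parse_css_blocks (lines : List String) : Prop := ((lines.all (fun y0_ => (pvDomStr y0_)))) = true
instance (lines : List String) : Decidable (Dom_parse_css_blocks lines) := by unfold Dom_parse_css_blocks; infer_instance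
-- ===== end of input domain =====

-- B replaces A's single accumulate-and-flush pass (which rescans its growing buffer with
-- any('}' in l …) at each depth-0 line) by a staged find-and-slice loop: locate the end of
-- the first complete block, slice it off, repeat on the suffix; same return value.

-- ===== PORT A =====
-- A's for-loop: state (blocks, current_block, depth)
def pvLoopA : List String → List (List String) → List String → Int → (List (List String) × List String)
  | [], blocks, current, _ => (blocks, current)
  | line :: rest, blocks, current, depth =>
    let cur := current ++ [line]
    let d := depth + (PySem.Str.count line "{" : Int) - (PySem.Str.count line "}" : Int)
    if d = 0 ∧ cur ≠ [] then
      if cur.any (fun l => PySem.Str.isIn "}" l) then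
        pvLoopA rest (blocks ++ [cur]) [] d
      else
        pvLoopA rest blocks cur d
    else
      pvLoopA rest blocks cur d

def parse_css_blocks (lines : List String) : List (List String) :=
  let r := pvLoopA lines [] [] 0
  if r.2 ≠ [] then r.1 ++ [r.2] else r.1

-- ===== PORT B =====
-- the for-loop of _first_cut: state (depth, seen); returns the 0-based cut index
def pvFirstCutAux : List String → Int → Bool → Option Nat
  | [], _, _ => none
  | line :: rest, depth, seen =>
    let d := depth + (PySem.Str.count line "{" : Int) - (PySem.Str.count line "}" : Int)
    let s := seen || PySem.Str.isIn "}" line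
    if d = 0 ∧ s = true then some 0
    else (pvFirstCutAux rest d s).map (· + 1)

def pvFirstCut (ls : List String) : Option Nat := pvFirstCutAux ls 0 false

-- B's while-loop: slice off the first complete block, repeat on the rest
def pvAltLoop : List String → List (List String) → List (List String)
  | [], blocks => blocks
  | line :: rest, blocks =>
    match pvFirstCut (line :: rest) with
    | none => blocks ++ [line :: rest]
    | some i =>
      pvAltLoop ((line :: rest).drop (i + 1)) (blocks ++ [(line :: rest).take (i + 1)])
termination_by ls _ => ls.length
decreasing_by simp

def parse_css_blocks_alt (lines : List String) : List (List String) := pvAltLoop lines []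

-- ===== PRECONDITION & SPEC =====
def Spec_parse_css_blocks (lines : List String) (out : List (List String)) : Prop := out = parse_css_blocks_alt lines
instance (lines : List String) (out : List (List String)) : Decidable (Spec_parse_css_blocks lines out) := by unfold Spec_parse_css_blocks; infer_instance

-- ===== CLAIM (what is proved, stated in full; the proofs are below) =====
def Claim_equal_parse_css_blocks : Prop := ∀ (lines : List String), Dom_parse_css_blocks lines → Spec_parse_css_blocks lines (parse_css_blocks lines)

-- ===== LEMMAS AND PROOFS =====
-- Proof-side bridge: A's loop with the rescan replaced by a flag (same state otherwise)
def pvLoopF : List String → List (List String) → List String → Int → Bool → (List (List String) × List String)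
  | [], blocks, current, _, _ => (blocks, current)
  | line :: rest, blocks, current, depth, hc =>
    let cur := current ++ [line]
    let d := depth + (PySem.Str.count line "{" : Int) - (PySem.Str.count line "}" : Int)
    let hc' := hc || PySem.Str.isIn "}" line
    if d = 0 ∧ hc' = true then
      pvLoopF rest (blocks ++ [cur]) [] d false
    else
      pvLoopF rest blocks cur d hc'

-- A's rescan of current_block equals the flag
lemma pvLoopA_eq_F (rest : List String) : ∀ (blocks : List (List String)) (current : List String) (depth : Int),
    pvLoopA rest blocks current depth
      = pvLoopF rest blocks current depth (current.any (fun l => PySem.Str.isIn "}" l)) := by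
  induction rest with
  | nil => intro blocks current depth; simp [pvLoopA, pvLoopF]
  | cons line rest ih =>
    intro blocks current depth
    simp only [pvLoopA, pvLoopF]
    have hany : (current ++ [line]).any (fun l => PySem.Str.isIn "}" l)
        = (current.any (fun l => PySem.Str.isIn "}" l) || PySem.Str.isIn "}" line) := by
      simp
    by_cases hd : depth + (PySem.Str.count line "{" : Int) - (PySem.Str.count line "}" : Int) = 0
    · by_cases hb : (current ++ [line]).any (fun l => PySem.Str.isIn "}" l) = true
      · rw [if_pos ⟨hd, by simp⟩, if_pos hb, if_pos ⟨hd, by rw [← hany]; exact hb⟩]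
        rw [ih]; simp
      · rw [if_pos ⟨hd, by simp⟩, if_neg hb,
            if_neg (by rw [← hany]; exact fun h => hb h.2), ih, hany]
    · rw [if_neg (fun h => hd h.1), if_neg (fun h => hd h.1), ih, hany]

-- The flag loop, expressed through the first cut index
lemma pvLoopF_cut (ls : List String) : ∀ (blocks : List (List String)) (current : List String) (depth : Int) (hc : Bool),
    pvLoopF ls blocks current depth hc
      = match pvFirstCutAux ls depth hc with
        | none => (blocks, current ++ ls)
        | some i => pvLoopF (ls.drop (i + 1)) (blocks ++ [current ++ ls.take (i + 1)]) [] 0 false := by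
  induction ls with
  | nil => intro blocks current depth hc; simp [pvLoopF, pvFirstCutAux]
  | cons line rest ih =>
    intro blocks current depth hc
    simp only [pvLoopF, pvFirstCutAux]
    by_cases hcut : (depth + (PySem.Str.count line "{" : Int) - (PySem.Str.count line "}" : Int) = 0
        ∧ (hc || PySem.Str.isIn "}" line) = true)
    · rw [if_pos hcut, if_pos hcut, hcut.1]
      simp
    · rw [if_neg hcut, if_neg hcut, ih]
      cases h : pvFirstCutAux rest (depth + (PySem.Str.count line "{" : Int) - (PySem.Str.count line "}" : Int))
          (hc || PySem.Str.isIn "}" line) with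
      | none => simp
      | some i => simp

-- finalized flag loop from a fresh state = B's while-loop
lemma pvLoopF_eq_alt (n : Nat) : ∀ (ls : List String) (blocks : List (List String)), ls.length ≤ n →
    (let r := pvLoopF ls blocks [] 0 false; if r.2 ≠ [] then r.1 ++ [r.2] else r.1)
      = pvAltLoop ls blocks := by
  induction n with
  | zero =>
    intro ls blocks h
    have : ls = [] := List.eq_nil_of_length_eq_zero (Nat.le_zero.mp h)
    subst this; rw [pvAltLoop]; simp [pvLoopF]
  | succ n ih =>
    intro ls blocks h
    cases ls with
    | nil => rw [pvAltLoop]; simp [pvLoopF]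
    | cons line rest =>
      rw [pvLoopF_cut, pvAltLoop]
      cases hcut : pvFirstCut (line :: rest) with
      | none =>
        have hcut' : pvFirstCutAux (line :: rest) 0 false = none := hcut
        simp only [hcut']
        simp
      | some i =>
        have hcut' : pvFirstCutAux (line :: rest) 0 false = some i := hcut
        simp only [hcut']
        have hlen : ((line :: rest).drop (i + 1)).length ≤ n := by
          simp at h ⊢; omega
        have := ih ((line :: rest).drop (i + 1)) (blocks ++ [(line :: rest).take (i + 1)]) hlen
        simpa using this

-- ===== VERDICT (by name: the statement is the Claim_ definition above) =====
theorem parse_css_blocks_spec : Claim_equal_parse_css_blocks := by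
  intro lines _
  unfold Spec_parse_css_blocks parse_css_blocks parse_css_blocks_alt
  rw [pvLoopA_eq_F]
  simpa using pvLoopF_eq_alt lines.length lines [] (le_refl _)
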